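-- pv_equiv track=rewrite | github.com/russellw/ml | glider_gun.py | mkboard
-- ===== SOURCE A (Python) =====
-- size = 50
--
-- def padboard(b):
--     r = []
--     for row in b:
--         r.append(row + [0] * (size - len(row)))
--     for i in range(size - len(b)):
--         r.append([0] * size)
--     return r
--
-- def mkboard(data):
--     b = []
--     row = []
--     for c in data:
--         if c == ".":
--             row.append(0)
--         elif c == "*" or c == "O":
--             row.append(1)
--         elif c == "\n":
--             b.append(row)
--             row = []
--         else:
--             raise ValueError(c)
--     b.append(row)
--     return padboard(b)
-- ===== SOURCE B (Python) =====
-- size = 50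
--
-- _TABLE = {".": 0, "*": 1, "O": 1}
--
-- def mkboard(data):
--     b = []
--     for line in data.split("\n"):
--         row = []
--         for c in line:
--             if c not in _TABLE:
--                 raise ValueError(c)
--             row.append(_TABLE[c])
--         b.append(row)
--     return [row + [0] * (size - len(row)) for row in b] + \
--            [[0] * size for _ in range(size - len(b))]
-- ===== Notes on version B (the rewrite author's own statement) =====
-- stated objective: idiomatic
-- what changed: Replaces A's single flat character scan with explicit newline/state bookkeeping by a split-first design: split the text on '\n', map each line through a lookup table, and inline the padding as comprehensions instead of A's append loops.
import Mathlib
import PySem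

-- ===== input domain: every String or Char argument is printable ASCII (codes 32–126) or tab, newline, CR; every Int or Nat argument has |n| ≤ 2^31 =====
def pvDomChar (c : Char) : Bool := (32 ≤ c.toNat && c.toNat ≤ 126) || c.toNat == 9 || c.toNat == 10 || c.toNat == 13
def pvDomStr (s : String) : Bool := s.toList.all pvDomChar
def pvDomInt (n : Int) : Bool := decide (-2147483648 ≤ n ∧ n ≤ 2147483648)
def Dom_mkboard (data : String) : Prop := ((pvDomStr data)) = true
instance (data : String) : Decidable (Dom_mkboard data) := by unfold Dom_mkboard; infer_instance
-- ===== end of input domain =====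

-- B replaces A's flat newline-detecting scan by split-on-'\n' + per-line table lookup,
-- with the padding inlined as comprehensions (idiomatic decomposition, same cost).

-- ===== PORT A =====
-- padboard: per-row padding loop, then an append loop over range(size - len(b)).
-- List.replicate's Nat subtraction clamps at 0 exactly like Python's [0] * negative = [].
def padboardA (b : List (List Int)) : List (List Int) :=
  let r := b.foldl (fun r row => r ++ [row ++ List.replicate (50 - row.length) (0 : Int)]) []
  (PySem.List.pyRange 0 (50 - (b.length : Int)) 1).foldl
    (fun r _ => r ++ [List.replicate 50 (0 : Int)]) r

def pvStepA (st : List (List Int) × List Int) (c : Char) : List (List Int) × List Int :=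
  if c = '.' then (st.1, st.2 ++ [(0 : Int)])
  else if c = '*' ∨ c = 'O' then (st.1, st.2 ++ [(1 : Int)])
  else if c = '\n' then (st.1 ++ [st.2], [])
  else st  -- Python: raise ValueError(c); such inputs are excluded by Pre_mkboard

def mkboard (data : String) : List (List Int) :=
  let st := data.toList.foldl pvStepA ([], [])
  padboardA (st.1 ++ [st.2])

-- ===== PORT B =====
def pvTableB : PySem.Dict Char Int :=
  PySem.Dict.ofList [('.', 0), ('*', 1), ('O', 1)]

def pvValB (c : Char) : Int :=
  match PySem.Dict.get? pvTableB c with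
  | some v => v
  | none => 0  -- Python: raise ValueError(c); such inputs are excluded by Pre_mkboard

-- data.split('\n') is ported as the corresponding library function List.splitOn '\n'.
def mkboard_alt (data : String) : List (List Int) :=
  let b := (List.splitOn '\n' data.toList).map (fun line => line.map pvValB)
  b.map (fun row => row ++ List.replicate (50 - row.length) (0 : Int))
    ++ List.replicate (50 - b.length) (List.replicate 50 (0 : Int))

-- ===== PRECONDITION & SPEC =====
-- Pre_ excludes exactly the inputs containing a character other than '.', '*', 'O', '\n',
-- on which Python A raises ValueError (B raises there too).
def Pre_mkboard (data : String) : Prop :=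
  data.toList.all (fun c => c == '.' || c == '*' || c == 'O' || c == '\n') = true
instance (data : String) : Decidable (Pre_mkboard data) := by unfold Pre_mkboard; infer_instance

def pvWitness_mkboard : String := ".*O\n"

def Spec_mkboard (data : String) (out : List (List Int)) : Prop := out = mkboard_alt data
instance (data : String) (out : List (List Int)) : Decidable (Spec_mkboard data out) := by unfold Spec_mkboard; infer_instance

-- ===== CLAIM (what is proved, stated in full; the proofs are below) =====
def Claim_equal_mkboard : Prop := ∀ (data : String), Dom_mkboard data → Pre_mkboard data → Spec_mkboard data (mkboard data)

-- ===== LEMMAS AND PROOFS =====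

theorem pv_foldl_snoc {α β : Type} (f : α → β) (l : List α) (acc : List β) :
    l.foldl (fun r x => r ++ [f x]) acc = acc ++ l.map f := by
  induction l generalizing acc with
  | nil => simp
  | cons a l ih => simp [ih]

theorem pv_padboardA (b : List (List Int)) :
    padboardA b = b.map (fun row => row ++ List.replicate (50 - row.length) (0 : Int))
      ++ List.replicate (50 - b.length) (List.replicate 50 (0 : Int)) := by
  simp only [padboardA, pv_foldl_snoc, List.map_const', PySem.List.length_pyRange_one,
    List.nil_append]
  congr 2
  omega

theorem pv_scan (cs : List Char) (b0 : List (List Int)) (row0 : List Int)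
    (h : ∀ c ∈ cs, c = '.' ∨ c = '*' ∨ c = 'O' ∨ c = '\n') :
    (cs.foldl pvStepA (b0, row0)).1 ++ [(cs.foldl pvStepA (b0, row0)).2]
      = b0 ++ List.modifyHead (fun s => row0 ++ s)
          ((List.splitOn '\n' cs).map (fun line => line.map pvValB)) := by
  induction cs generalizing b0 row0 with
  | nil => simp [List.splitOn]
  | cons c cs ih =>
    have hc := h c (by simp)
    have hrest : ∀ c ∈ cs, c = '.' ∨ c = '*' ∨ c = 'O' ∨ c = '\n' :=
      fun x hx => h x (by simp [hx])
    simp only [List.splitOn] at *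
    rcases hsp : List.splitOnP (· == '\n') cs with _ | ⟨s0, rest⟩
    · exact absurd hsp (List.splitOnP_ne_nil _ cs)
    · rcases hc with hc | hc | hc | hc <;> subst hc <;>
        simp only [List.foldl_cons] <;>
        [ (have hstep : pvStepA (b0, row0) '.' = (b0, row0 ++ [(0 : Int)]) := by
            simp [pvStepA]);
          (have hstep : pvStepA (b0, row0) '*' = (b0, row0 ++ [(1 : Int)]) := by
            simp [pvStepA]);
          (have hstep : pvStepA (b0, row0) 'O' = (b0, row0 ++ [(1 : Int)]) := by
            simp [pvStepA]);
          (have hstep : pvStepA (b0, row0) '\n' = (b0 ++ [row0], []) := by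
            simp [pvStepA])] <;>
        rw [hstep, ih _ _ hrest, hsp] <;>
        simp [List.splitOnP_cons, hsp,
          show pvValB '.' = 0 from rfl, show pvValB '*' = 1 from rfl,
          show pvValB 'O' = 1 from rfl]

-- ===== VERDICT (by name: the statement is the Claim_ definition above) =====
theorem pv_modifyHead_self (l : List (List Int)) :
    List.modifyHead (fun s : List Int => s) l = l := by
  cases l <;> simp

theorem mkboard_spec : Claim_equal_mkboard := by
  intro data _hd hpre
  have hall : ∀ c ∈ data.toList, c = '.' ∨ c = '*' ∨ c = 'O' ∨ c = '\n' := by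
    intro c hc
    have := List.all_eq_true.mp hpre c hc
    simpa [or_assoc] using this
  unfold Spec_mkboard mkboard mkboard_alt
  have hs := pv_scan data.toList [] [] hall
  simp only [List.nil_append, pv_modifyHead_self] at hs
  simp only []
  rw [hs, pv_padboardA]
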